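-- pv_equiv track=rewrite | github.com/mila-iqia/SARC | sarc/users/acquire.py | filter_duplicate_drac_members
-- ===== SOURCE A (Python) =====
-- def filter_duplicate_drac_members(
--     LD_drac_members: list[dict[str, str]],
-- ) -> list[dict[str, str]]:
--     DL_users: dict[
--         str, list[dict[str, str]]
--     ] = {}  # dict of list of drac members, key=username
--     for user in LD_drac_members:
--         if user["username"] not in DL_users:
--             DL_users[user["username"]] = []
--         DL_users[user["username"]].append(user)
--
--     LD_filtered_drac_members: list[dict[str, str]] = []
--     for _, users in DL_users.items():
--         # keep the active entry, or the  the last entry if no active one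
--         active_users = [
--             user for user in users if user["activation_status"] == "activated"
--         ]
--         user_to_keep = None
--         if active_users:
--             user_to_keep = active_users[-1]
--         else:
--             user_to_keep = users[-1]
--         LD_filtered_drac_members.append(user_to_keep)
--
--     return LD_filtered_drac_members
-- ===== SOURCE B (Python) =====
-- def filter_duplicate_drac_members(
--     LD_drac_members: list[dict[str, str]],
-- ) -> list[dict[str, str]]:
--     # one pass: per username keep (current entry, have-we-seen-an-activated-entry)
--     chosen: dict[str, tuple[dict[str, str], bool]] = {}
--     for user in LD_drac_members:
--         name = user["username"]
--         if user["activation_status"] == "activated":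
--             chosen[name] = (user, True)
--         elif not chosen.get(name, (None, False))[1]:
--             chosen[name] = (user, False)
--     return [entry for entry, _ in chosen.values()]
-- ===== Notes on version B (the rewrite author's own statement) =====
-- stated objective: simpler
-- what changed: A groups all entries into per-username lists and then filters each group in a second phase; B does a single pass keeping one (entry, seen-activated) pair per username and returns the kept entries.
import Mathlib
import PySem

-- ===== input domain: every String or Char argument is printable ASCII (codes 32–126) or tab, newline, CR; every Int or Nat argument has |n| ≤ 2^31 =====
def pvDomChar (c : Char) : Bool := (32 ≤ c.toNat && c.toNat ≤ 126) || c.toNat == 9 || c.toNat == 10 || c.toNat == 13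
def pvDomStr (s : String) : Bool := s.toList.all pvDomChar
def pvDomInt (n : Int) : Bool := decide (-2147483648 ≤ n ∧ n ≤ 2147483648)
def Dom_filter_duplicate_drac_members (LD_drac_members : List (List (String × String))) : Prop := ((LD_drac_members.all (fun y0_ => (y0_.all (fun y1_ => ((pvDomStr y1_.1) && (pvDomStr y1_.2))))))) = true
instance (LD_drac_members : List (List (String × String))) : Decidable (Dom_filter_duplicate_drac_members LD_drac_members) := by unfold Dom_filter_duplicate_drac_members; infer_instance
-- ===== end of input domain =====

-- B replaces A's group-into-lists-then-filter-each-group two-phase algorithm by a single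
-- pass that keeps one (entry, seen-activated) pair per username; objective: simpler.

-- Python-dict lookup user[k] on a user record (dict → assoc list; first match).
def pvUserGet? (u : List (String × String)) (k : String) : Option String :=
  (PySem.Dict.mk u).get? k

-- user["username"] / the test user["activation_status"] == "activated"
-- (the .getD "" default is unreachable under Pre_, where both keys are present).
def pvName (u : List (String × String)) : String := (pvUserGet? u "username").getD ""
def pvIsAct (u : List (String × String)) : Bool :=
  (pvUserGet? u "activation_status").getD "" == "activated"

-- ===== PORT A =====
def filter_duplicate_drac_members (LD_drac_members : List (List (String × String))) : List (List (String × String)) :=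
  -- phase 1: DL_users, grouping dict username ↦ list of its entries
  let DL_users : PySem.Dict String (List (List (String × String))) :=
    LD_drac_members.foldl
      (fun d user =>
        let d1 := if d.contains (pvName user) then d else d.insert (pvName user) []
        -- DL_users[user["username"]].append(user)
        d1.modify (pvName user) [] (fun l => l ++ [user]))
      PySem.Dict.empty
  -- phase 2: per group keep the last activated entry, else the last entry
  DL_users.items.foldl
    (fun acc p =>
      let users := p.2
      let active_users := users.filter pvIsAct
      let user_to_keep :=
        if active_users.isEmpty then (PySem.List.pyGet? users (-1)).getD []
        else (PySem.List.pyGet? active_users (-1)).getD []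
      acc ++ [user_to_keep])
    []

-- ===== PORT B =====
def filter_duplicate_drac_members_alt (LD_drac_members : List (List (String × String))) : List (List (String × String)) :=
  let chosen : PySem.Dict String ((List (String × String)) × Bool) :=
    LD_drac_members.foldl
      (fun d user =>
        let name := pvName user
        if pvIsAct user then d.insert name (user, true)
        else if (d.getD name ([], false)).2 then d
        else d.insert name (user, false))
      PySem.Dict.empty
  chosen.values.map (fun e => e.1)

-- ===== PRECONDITION & SPEC =====
-- Pre_ excludes exactly the records lacking a "username" or "activation_status" key,
-- on which the Python raises KeyError.
def Pre_filter_duplicate_drac_members (LD_drac_members : List (List (String × String))) : Prop :=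
  ∀ u ∈ LD_drac_members, (pvUserGet? u "username").isSome ∧ (pvUserGet? u "activation_status").isSome
instance (LD_drac_members : List (List (String × String))) : Decidable (Pre_filter_duplicate_drac_members LD_drac_members) := by unfold Pre_filter_duplicate_drac_members; infer_instance

def pvWitness_filter_duplicate_drac_members : (List (List (String × String))) :=
  [[("username", "alice"), ("activation_status", "activated")],
   [("username", "alice"), ("activation_status", "old")]]

def Spec_filter_duplicate_drac_members (LD_drac_members : List (List (String × String))) (out : List (List (String × String))) : Prop := out = filter_duplicate_drac_members_alt LD_drac_members
instance (LD_drac_members : List (List (String × String))) (out : List (List (String × String))) : Decidable (Spec_filter_duplicate_drac_members LD_drac_members out) := by unfold Spec_filter_duplicate_drac_members; infer_instance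

-- ===== CLAIM (what is proved, stated in full; the proofs are below) =====
def Claim_equal_filter_duplicate_drac_members : Prop := ∀ (LD_drac_members : List (List (String × String))), Dom_filter_duplicate_drac_members LD_drac_members → Pre_filter_duplicate_drac_members LD_drac_members → Spec_filter_duplicate_drac_members LD_drac_members (filter_duplicate_drac_members LD_drac_members)

-- ===== LEMMAS AND PROOFS =====

-- what A keeps from one group, and B's per-username state, as functions of the group
def pvPick (users : List (List (String × String))) : List (String × String) :=
  let active := users.filter pvIsAct
  if active.isEmpty then (PySem.List.pyGet? users (-1)).getD []
  else (PySem.List.pyGet? active (-1)).getD []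

def pvG (v : List (List (String × String))) : (List (String × String)) × Bool :=
  (pvPick v, v.any pvIsAct)

def pvF (p : String × List (List (String × String))) : String × ((List (String × String)) × Bool) :=
  (p.1, pvG p.2)

-- A's per-element step / B's per-element step (the fold bodies of the two ports)
def pvStepA (d : PySem.Dict String (List (List (String × String)))) (user : List (String × String)) : PySem.Dict String (List (List (String × String))) :=
  let d1 := if d.contains (pvName user) then d else d.insert (pvName user) []
  d1.modify (pvName user) [] (fun l => l ++ [user])

def pvStepB (d : PySem.Dict String ((List (String × String)) × Bool)) (user : List (String × String)) : PySem.Dict String ((List (String × String)) × Bool) :=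
  let name := pvName user
  if pvIsAct user then d.insert name (user, true)
  else if (d.getD name ([], false)).2 then d
  else d.insert name (user, false)

lemma pvPick_append_act (v : List (List (String × String))) (u : List (String × String))
    (h : pvIsAct u = true) : pvPick (v ++ [u]) = u := by
  simp [pvPick, List.filter_append, h]

lemma pvPick_append_seen (v : List (List (String × String))) (u : List (String × String))
    (hu : pvIsAct u = false) (hv : v.any pvIsAct = true) : pvPick (v ++ [u]) = pvPick v := by
  have hne : v.filter pvIsAct ≠ [] := by
    simp only [ne_eq, List.filter_eq_nil_iff, not_forall]
    rcases List.any_eq_true.mp hv with ⟨x, hx, ha⟩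
    exact ⟨x, hx, by simp [ha]⟩
  simp [pvPick, List.filter_append, hu, List.isEmpty_iff, hne]

lemma pvPick_append_unseen (v : List (List (String × String))) (u : List (String × String))
    (hu : pvIsAct u = false) (hv : v.any pvIsAct = false) : pvPick (v ++ [u]) = u := by
  have hnil : v.filter pvIsAct = [] := by
    simp only [List.filter_eq_nil_iff]
    intro x hx
    by_contra hc
    exact absurd (List.any_eq_true.mpr ⟨x, hx, by simpa using hc⟩) (by simp [hv])
  simp [pvPick, List.filter_append, hu, hnil]

-- in a list of pairs with nodup first components, two members with equal keys are equal
lemma mem_eq_of_nodup_fst {α β : Type} {l : List (α × β)} (h : (l.map Prod.fst).Nodup)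
    {p q : α × β} (hp : p ∈ l) (hq : q ∈ l) (he : p.1 = q.1) : p = q := by
  induction l with
  | nil => cases hp
  | cons a t ih =>
    simp only [List.map_cons, List.nodup_cons] at h
    rcases List.mem_cons.mp hp with rfl | hp' <;> rcases List.mem_cons.mp hq with rfl | hq'
    · rfl
    · exact absurd (he ▸ List.mem_map_of_mem hq') h.1
    · exact absurd (he ▸ List.mem_map_of_mem hp') h.1
    · exact ih h.2 hp' hq'

-- one step of B on the transformed dict is the transform of one step of A
lemma step_comm (d : PySem.Dict String (List (List (String × String))))
    (u : List (String × String)) (hnd : d.keys.Nodup) :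
    pvStepB ⟨d.items.map pvF⟩ u = ⟨(pvStepA d u).items.map pvF⟩ := by
  obtain ⟨l⟩ := d
  set k := pvName u with hk
  have hcont : (PySem.Dict.mk (l.map pvF)).contains k = (PySem.Dict.mk l).contains k := by
    simp [PySem.Dict.contains, List.any_map, pvF, Function.comp_def]
  cases hfind : l.find? (fun p => p.1 == k) with
  | none =>
    -- k is a fresh username
    have hall : ∀ p ∈ l, ¬ (p.1 == k) = true := List.find?_eq_none.mp hfind
    have hnc : (PySem.Dict.mk l).contains k = false := by
      simp only [PySem.Dict.contains]
      rw [List.any_eq_false]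
      intro p hp
      simpa using hall p hp
    have hA : (pvStepA ⟨l⟩ u).items = l ++ [(k, [u])] := by
      show (((if (PySem.Dict.mk l).contains (pvName u) then PySem.Dict.mk l
          else (PySem.Dict.mk l).insert (pvName u) [])).modify (pvName u) []
          (fun s => s ++ [u])).items = l ++ [(k, [u])]
      rw [← hk, if_neg (by rw [hnc]; exact Bool.false_ne_true)]
      have hins : (PySem.Dict.mk l).insert k ([] : List (List (String × String)))
          = PySem.Dict.mk (l ++ [(k, [])]) := by
        simp only [PySem.Dict.insert, hnc, Bool.false_eq_true, if_false]
      rw [hins]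
      have h2 : (l ++ [(k, ([] : List (List (String × String))))]).find? (fun p => p.1 == k)
          = some (k, []) := by
        rw [List.find?_append, List.find?_eq_none.mpr hall]
        simp
      have hgd : (PySem.Dict.mk (l ++ [(k, [])])).getD k
          ([] : List (List (String × String))) = [] := by
        simp only [PySem.Dict.getD, PySem.Dict.get?, h2, Option.map_some, Option.getD_some]
      have hc2 : (PySem.Dict.mk (l ++ [(k, [])])).contains k = true := by
        simp [PySem.Dict.contains]
      simp only [PySem.Dict.modify, hgd, List.nil_append, PySem.Dict.insert, hc2, if_true]
      rw [List.map_append]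
      congr 1
      · exact (List.map_congr_left (fun p hp => by simp [hall p hp])).trans (List.map_id l)
      · simp
    have hBnc : (PySem.Dict.mk (l.map pvF)).contains k = false := hcont.trans hnc
    have hfB : (l.map pvF).find? (fun p => p.1 == k) = none := by
      rw [List.find?_eq_none]
      intro p hp
      obtain ⟨q, hq, rfl⟩ := List.mem_map.mp hp
      simpa [pvF] using hall q hq
    have hget : (PySem.Dict.mk (l.map pvF)).getD k ([], false) = ([], false) := by
      simp [PySem.Dict.getD, PySem.Dict.get?, hfB]
    have hB : (pvStepB ⟨l.map pvF⟩ u).items = l.map pvF ++ [(k, (u, pvIsAct u))] := by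
      cases ha : pvIsAct u with
      | true =>
        simp only [pvStepB, ← hk, ha, if_true]
        simp only [PySem.Dict.insert, hBnc, Bool.false_eq_true, if_false]
      | false =>
        simp only [pvStepB, ← hk, ha, Bool.false_eq_true, if_false, hget]
        simp only [PySem.Dict.insert, hBnc, Bool.false_eq_true, if_false]
    apply PySem.Dict.ext
    rw [hB, hA, List.map_append]
    have hg1 : pvG [u] = (u, pvIsAct u) := by
      cases ha : pvIsAct u with
      | true => simp [pvG, pvPick, ha, PySem.List.pyGet?, PySem.List.pyIdx?]
      | false => simp [pvG, pvPick, ha, PySem.List.pyGet?, PySem.List.pyIdx?]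
    simp [pvF, hg1]
  | some pr =>
    -- k already seen: pr = (k, v), the unique entry for k
    obtain ⟨k₀, v⟩ := pr
    have hkeq : k₀ = k := by
      have := List.find?_some hfind
      simpa using this
    subst hkeq
    have hmem : (k, v) ∈ l := List.mem_of_find?_eq_some hfind
    have hc : (PySem.Dict.mk l).contains k = true := by
      simp only [PySem.Dict.contains]
      exact List.any_eq_true.mpr ⟨(k, v), hmem, by simp⟩
    have hgd : (PySem.Dict.mk l).getD k ([] : List (List (String × String))) = v := by
      simp only [PySem.Dict.getD, PySem.Dict.get?, hfind, Option.map_some,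
        Option.getD_some]
    have hA : (pvStepA ⟨l⟩ u).items
        = l.map (fun p => if p.1 == k then (k, v ++ [u]) else p) := by
      show (((if (PySem.Dict.mk l).contains (pvName u) then PySem.Dict.mk l
          else (PySem.Dict.mk l).insert (pvName u) [])).modify (pvName u) []
          (fun s => s ++ [u])).items
          = l.map (fun p => if p.1 == k then (k, v ++ [u]) else p)
      rw [← hk, if_pos (by rw [hc])]
      simp only [PySem.Dict.modify, hgd, PySem.Dict.insert, hc, if_true]
    -- key fact: any member of l whose key is k IS (k, v)
    have huniq : ∀ p ∈ l, p.1 = k → p = (k, v) := by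
      intro p hp he
      exact mem_eq_of_nodup_fst (by simpa [PySem.Dict.keys] using hnd) hp hmem he
    have hgetB : (PySem.Dict.mk (l.map pvF)).get? k = some (pvG v) := by
      simp only [PySem.Dict.get?]
      rw [List.find?_map]
      have hpc : (fun (p : String × ((List (String × String)) × Bool)) => p.1 == k) ∘ pvF
          = (fun p => p.1 == k) := by
        funext p; simp [pvF]
      rw [hpc, hfind]
      simp [pvF]
    have hcB : (PySem.Dict.mk (l.map pvF)).contains k = true := hcont.trans hc
    apply PySem.Dict.ext
    rw [hA, List.map_map]
    cases ha : pvIsAct u with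
    | true =>
      have hBitems : (pvStepB ⟨l.map pvF⟩ u).items
          = (l.map pvF).map (fun p => if p.1 == k then (k, (u, true)) else p) := by
        simp only [pvStepB, ← hk, ha, if_true]
        simp only [PySem.Dict.insert, hcB, if_true]
      rw [hBitems, List.map_map]
      apply List.map_congr_left
      intro p hp
      by_cases hpk : p.1 = k
      · have hpv : p = (k, v) := huniq p hp hpk
        subst hpv
        simp [pvF, pvG, pvPick_append_act v u ha, ha]
      · simp [pvF, hpk]
    | false =>
      have hgdB : (PySem.Dict.mk (l.map pvF)).getD k ([], false) = pvG v := by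
        simp [PySem.Dict.getD, hgetB]
      cases hseen : v.any pvIsAct with
      | true =>
        have hBitems : (pvStepB ⟨l.map pvF⟩ u).items = l.map pvF := by
          simp only [pvStepB, ← hk, ha, Bool.false_eq_true, if_false, hgdB]
          simp [pvG, hseen]
        rw [hBitems]
        apply Eq.symm
        apply List.map_congr_left
        intro p hp
        by_cases hpk : p.1 = k
        · have hpv : p = (k, v) := huniq p hp hpk
          subst hpv
          simp [pvF, pvG, pvPick_append_seen v u ha hseen, ha, hseen]
        · simp [pvF, hpk]
      | false =>
        have hBitems : (pvStepB ⟨l.map pvF⟩ u).items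
            = (l.map pvF).map (fun p => if p.1 == k then (k, (u, false)) else p) := by
          simp only [pvStepB, ← hk, ha, Bool.false_eq_true, if_false, hgdB]
          simp only [pvG, hseen, Bool.false_eq_true, if_false]
          simp only [PySem.Dict.insert, hcB, if_true]
        rw [hBitems, List.map_map]
        apply List.map_congr_left
        intro p hp
        by_cases hpk : p.1 = k
        · have hpv : p = (k, v) := huniq p hp hpk
          subst hpv
          simp [pvF, pvG, pvPick_append_unseen v u ha hseen, ha, hseen]
        · simp [pvF, hpk]

lemma stepA_nodup (d : PySem.Dict String (List (List (String × String))))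
    (u : List (String × String)) (hnd : d.keys.Nodup) : (pvStepA d u).keys.Nodup := by
  unfold pvStepA
  apply PySem.Dict.nodup_keys_insert
  split
  · exact hnd
  · exact PySem.Dict.nodup_keys_insert _ _ _ hnd

lemma fold_comm (L : List (List (String × String)))
    (d : PySem.Dict String (List (List (String × String)))) (hnd : d.keys.Nodup) :
    L.foldl pvStepB ⟨d.items.map pvF⟩ = ⟨(L.foldl pvStepA d).items.map pvF⟩ := by
  induction L generalizing d with
  | nil => rfl
  | cons u t ih =>
    simp only [List.foldl_cons]
    rw [step_comm d u hnd]
    exact ih (pvStepA d u) (stepA_nodup d u hnd)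

-- ===== VERDICT (by name: the statement is the Claim_ definition above) =====
theorem filter_duplicate_drac_members_spec : Claim_equal_filter_duplicate_drac_members := by
  intro L _ _
  unfold Spec_filter_duplicate_drac_members filter_duplicate_drac_members filter_duplicate_drac_members_alt
  have hA : L.foldl (fun d user =>
        let d1 := if d.contains (pvName user) then d else d.insert (pvName user) []
        d1.modify (pvName user) [] (fun l => l ++ [user])) PySem.Dict.empty
      = L.foldl pvStepA PySem.Dict.empty := rfl
  have hB : L.foldl (fun d user =>
        let name := pvName user
        if pvIsAct user then d.insert name (user, true)
        else if (d.getD name ([], false)).2 then d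
        else d.insert name (user, false)) PySem.Dict.empty
      = L.foldl pvStepB PySem.Dict.empty := rfl
  simp only [hA, hB]
  have h0 : (PySem.Dict.empty : PySem.Dict String ((List (String × String)) × Bool))
      = ⟨(PySem.Dict.empty : PySem.Dict String (List (List (String × String)))).items.map pvF⟩ := rfl
  rw [h0, fold_comm L PySem.Dict.empty (by simp [PySem.Dict.empty, PySem.Dict.keys])]
  rw [PySem.List.foldl_append_singleton_eq_map _ ((L.foldl pvStepA PySem.Dict.empty).items) []]
  simp [PySem.Dict.values, List.map_map, pvF, pvG, Function.comp_def, pvPick]
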